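-- pv_equiv track=rewrite | github.com/dmitriyshub/Hangman | 722numbers_letters_count.py | numbers_letters_count
-- ===== SOURCE A (Python) =====
-- def numbers_letters_count(my_str):
--     new_list = []
--     number_count = 0
--     string_count = ""
--     for i in my_str:
--         if i.isdigit():
--             number_count = number_count + int(1)
--         else:
--             string_count += i
--
--     new_list.append(number_count)
--     new_list.append(len(string_count))
--     return new_list
-- ===== SOURCE B (Python) =====
-- def numbers_letters_count(my_str):
--     digits = sum(my_str.count(d) for d in "0123456789")
--     return [digits, len(my_str) - digits]
-- ===== Notes on version B (the rewrite author's own statement) =====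
-- stated objective: faster
-- what changed: B never tests characters with isdigit and keeps no per-character accumulators: it obtains the digit total as the sum of ten library str.count scans, one per decimal digit character, and derives the non-digit count as len(my_str) minus that total (A makes one Python-level pass testing each character and maintaining two parallel accumulators, a counter and a string of non-digits).
import Mathlib
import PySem

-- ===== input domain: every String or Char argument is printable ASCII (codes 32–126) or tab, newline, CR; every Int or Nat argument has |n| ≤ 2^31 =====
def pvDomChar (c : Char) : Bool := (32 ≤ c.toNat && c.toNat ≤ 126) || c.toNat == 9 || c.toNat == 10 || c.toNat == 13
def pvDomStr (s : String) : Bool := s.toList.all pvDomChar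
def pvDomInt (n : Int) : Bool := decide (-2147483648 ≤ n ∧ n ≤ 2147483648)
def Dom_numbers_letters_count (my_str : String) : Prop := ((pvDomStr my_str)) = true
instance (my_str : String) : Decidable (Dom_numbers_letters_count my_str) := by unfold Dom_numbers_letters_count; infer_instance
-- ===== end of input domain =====

-- B replaces A's single isdigit-testing pass with two accumulators by ten per-digit str.count scans plus a length subtraction (objective: alternative algorithm, measured faster via C-level count scans).

-- ===== PORT A =====
-- A's loop over the characters, carrying (number_count, string_count)
def nlcLoopA (cs : List Char) (number_count : Int) (string_count : List Char) : Int × List Char :=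
  match cs with
  | [] => (number_count, string_count)
  | i :: rest =>
      if PySem.Chars.isdigit i then nlcLoopA rest (number_count + 1) string_count
      else nlcLoopA rest number_count (string_count ++ [i])

def numbers_letters_count (my_str : String) : List Int :=
  let r := nlcLoopA my_str.toList 0 []
  [r.1, (r.2.length : Int)]

-- ===== PORT B =====
-- digits = sum(my_str.count(d) for d in "0123456789"); my_str.count(d) for a single character d
-- is List.count of that character over the code points (exact: occurrences of a length-1 substring).
def numbers_letters_count_alt (my_str : String) : List Int :=
  let digits : Int :=
    ("0123456789".toList).foldl (fun acc d => acc + (my_str.toList.count d : Int)) 0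
  [digits, (my_str.toList.length : Int) - digits]

-- ===== PRECONDITION & SPEC =====
def Spec_numbers_letters_count (my_str : String) (out : List Int) : Prop := out = numbers_letters_count_alt my_str
instance (my_str : String) (out : List Int) : Decidable (Spec_numbers_letters_count my_str out) := by unfold Spec_numbers_letters_count; infer_instance

-- ===== CLAIM (what is proved, stated in full; the proofs are below) =====
def Claim_equal_numbers_letters_count : Prop := ∀ (my_str : String), Dom_numbers_letters_count my_str → Spec_numbers_letters_count my_str (numbers_letters_count my_str)

-- ===== LEMMAS AND PROOFS =====

-- A's loop computes (digit count, list of non-digit characters)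
lemma nlcLoopA_spec (cs : List Char) (n : Int) (sc : List Char) :
    nlcLoopA cs n sc =
      (cs.foldl (fun acc c => if PySem.Chars.isdigit c then acc + 1 else acc) n,
       sc ++ cs.filter (fun c => !PySem.Chars.isdigit c)) := by
  induction cs generalizing n sc with
  | nil => simp [nlcLoopA]
  | cons i rest ih =>
      by_cases h : PySem.Chars.isdigit i = true <;>
        simp [nlcLoopA, h, ih]

-- isdigit is exactly membership in the ten ASCII digit characters
lemma isdigit_iff_mem (c : Char) :
    PySem.Chars.isdigit c = (c ∈ ['0','1','2','3','4','5','6','7','8','9']) := by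
  simp only [PySem.Chars.isdigit, Bool.and_eq_true, decide_eq_true_eq, List.mem_cons,
    List.not_mem_nil, or_false, eq_iff_iff]
  constructor
  · rintro ⟨h1, h2⟩
    have hn1 : 48 ≤ c.toNat := Nat.succ_le_of_lt h1
    have hn2 : c.toNat ≤ 57 := Fin.mk_le_mk.mp h2
    have hc : Char.ofNat c.toNat = c := Char.ofNat_toNat c
    interval_cases h : c.toNat <;> rw [← hc] <;> decide
  · rintro (rfl|rfl|rfl|rfl|rfl|rfl|rfl|rfl|rfl|rfl) <;> exact ⟨by decide, by decide⟩

-- over a duplicate-free list, the per-element 0/1 sum is a membership indicator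
lemma nlc_ite_sum (ds : List Char) (c : Char) (h : ds.Nodup) :
    (ds.map (fun d => if d == c then 1 else 0)).sum = (if c ∈ ds then 1 else 0) := by
  induction ds with
  | nil => simp
  | cons d ds ih =>
      simp only [List.nodup_cons] at h
      by_cases hdc : d = c
      · subst hdc
        have hz : (List.map (fun e => if e == d then 1 else 0) ds).sum = 0 := by
          rw [List.sum_eq_zero]
          intro x hx
          simp only [List.mem_map] at hx
          obtain ⟨e, he, rfl⟩ := hx
          have hne : e ≠ d := fun hh => h.1 (hh ▸ he)
          simp [hne]
        rw [List.map_cons, List.sum_cons, hz]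
        simp
      · have hb : ((d == c) = true) = False := by simp [hdc]
        simp only [List.map_cons, List.sum_cons, hb, if_false, zero_add, ih h.2,
          List.mem_cons]
        have hiff : (c = d ∨ c ∈ ds) ↔ c ∈ ds := by
          constructor
          · rintro (rfl | hm)
            · exact absurd rfl hdc
            · exact hm
          · exact Or.inr
        rw [if_congr hiff rfl rfl]

-- the per-digit counts sum to the number of characters of l that are members of ds
lemma nlc_sum_counts (ds : List Char) (h : ds.Nodup) (l : List Char) :
    (ds.map (fun d => l.count d)).sum = l.countP (fun c => decide (c ∈ ds)) := by
  induction l with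
  | nil => simp
  | cons c l ih =>
      have hcount : (fun d => (c :: l).count d) = fun d => l.count d + if d == c then 1 else 0 := by
        funext d
        by_cases hcd : d = c
        · subst hcd; simp
        · simp [hcd, Ne.symm hcd]
      rw [hcount, List.sum_map_add, ih, nlc_ite_sum ds c h, List.countP_cons]
      by_cases hm : c ∈ ds <;> simp [hm]

-- a foldl accumulating '+ f d' is the sum of the mapped values
lemma nlc_foldl_add (ds : List Char) (f : Char → Int) (a : Int) :
    ds.foldl (fun acc d => acc + f d) a = a + (ds.map f).sum := by
  induction ds generalizing a with
  | nil => simp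
  | cons d ds ih => simp [ih]; ring

-- ===== VERDICT (by name: the statement is the Claim_ definition above) =====
theorem numbers_letters_count_spec : Claim_equal_numbers_letters_count := by
  intro my_str _
  unfold Spec_numbers_letters_count numbers_letters_count numbers_letters_count_alt
  rw [nlcLoopA_spec]
  have hds : "0123456789".toList = ['0','1','2','3','4','5','6','7','8','9'] := by decide
  have hnd : (['0','1','2','3','4','5','6','7','8','9'] : List Char).Nodup := by decide
  set l := my_str.toList with hl
  have hB : ("0123456789".toList).foldl (fun acc d => acc + (l.count d : Int)) 0
      = (l.countP PySem.Chars.isdigit : Int) := by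
    rw [hds, nlc_foldl_add, zero_add]
    have hcast : ((['0','1','2','3','4','5','6','7','8','9'] : List Char).map
        (fun d => (l.count d : Int))).sum
        = (((['0','1','2','3','4','5','6','7','8','9'] : List Char).map
            (fun d => l.count d)).sum : Int) := by
      simp
    rw [hcast, nlc_sum_counts _ hnd l]
    congr 2
    funext c
    simp [← isdigit_iff_mem c]
  have hA1 : l.foldl (fun acc c => if PySem.Chars.isdigit c then acc + 1 else acc) 0
      = (l.countP PySem.Chars.isdigit : Int) := by
    rw [PySem.List.foldl_if_add_one]
    simp
  have hA2 : ((l.filter (fun c => !PySem.Chars.isdigit c)).length : Int)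
      = (l.length : Int) - (l.countP PySem.Chars.isdigit : Int) := by
    have h1 : (l.filter (fun c => !PySem.Chars.isdigit c)).length
        = l.countP (fun c => !PySem.Chars.isdigit c) := List.countP_eq_length_filter.symm
    have hpred : ∀ a, (!PySem.Chars.isdigit a) = decide ¬(PySem.Chars.isdigit a = true) := by
      intro a; by_cases hh : PySem.Chars.isdigit a <;> simp [hh]
    have h2 : l.length = l.countP PySem.Chars.isdigit + l.countP (fun c => !PySem.Chars.isdigit c) := by
      simp only [hpred]
      exact List.length_eq_countP_add_countP PySem.Chars.isdigit
    omega
  simp only [List.nil_append, hB, hA1, hA2]
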